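-- pv_equiv track=rewrite | github.com/yashksaini-coder/opensre | app/cli/interactive_shell/intent_parser.py | _protected_spans
-- ===== SOURCE A (Python) =====
-- def _protected_spans(text: str) -> list[tuple[int, int]]:
--     """Return [start, end) spans enclosed by backticks or quotes."""
--     spans: list[tuple[int, int]] = []
--     active_quote: str | None = None
--     start = -1
--     escape = False
--     for idx, ch in enumerate(text):
--         if active_quote is None:
--             if ch in {"`", "'", '"'}:
--                 active_quote = ch
--                 start = idx
--             continue
--         if active_quote != "`" and ch == "\\" and not escape:
--             escape = True
--             continue
--         if ch == active_quote and not escape: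
--             spans.append((start, idx + 1))
--             active_quote = None
--             start = -1
--         escape = False
--     if active_quote is not None and start >= 0:
--         spans.append((start, len(text)))
--     return spans
-- ===== SOURCE B (Python) =====
-- def _protected_spans(text: str) -> list[tuple[int, int]]:
--     """Return [start, end) spans enclosed by backticks or quotes."""
--     spans: list[tuple[int, int]] = []
--     n = len(text)
--     i = 0
--     while i < n:
--         ch = text[i]
--         if ch not in "`'\"":
--             i += 1
--             continue
--         start = i
--         j = i + 1
--         if ch == "`":
--             while j < n and text[j] != "`":
--                 j += 1
--         else:
--             escape = False
--             while j < n: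
--                 c = text[j]
--                 if escape:
--                     escape = False
--                 elif c == "\\":
--                     escape = True
--                 elif c == ch:
--                     break
--                 j += 1
--         if j < n:
--             spans.append((start, j + 1))
--             i = j + 1
--         else:
--             spans.append((start, n))
--             i = n
--     return spans
-- ===== Notes on version B (the rewrite author's own statement) =====
-- stated objective: alternative
-- what changed: Replaced the single flat state-machine fold (active_quote/start/escape carried across every character) with an index-driven nested scan: an outer loop finds each opening delimiter and dispatches to one of two dedicated inner closers (a plain scan for backticks, an escape-tracking scan for quotes), so no delimiter state survives between spans.
import Mathlib
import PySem

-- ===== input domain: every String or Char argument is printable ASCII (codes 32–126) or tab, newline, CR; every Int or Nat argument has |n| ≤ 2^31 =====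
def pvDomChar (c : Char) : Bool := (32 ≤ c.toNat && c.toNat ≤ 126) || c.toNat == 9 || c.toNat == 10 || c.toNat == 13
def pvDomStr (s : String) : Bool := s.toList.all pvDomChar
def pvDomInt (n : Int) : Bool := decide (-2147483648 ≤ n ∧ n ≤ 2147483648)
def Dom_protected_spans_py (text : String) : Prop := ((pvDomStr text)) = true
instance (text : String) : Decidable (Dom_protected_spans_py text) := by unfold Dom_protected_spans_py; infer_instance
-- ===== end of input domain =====

-- B replaces A's flat state-machine loop by an outer opener scan with two dedicated inner
-- closer scans (alternative decomposition, same cost); return values proved identical.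

-- ===== PORT A =====
-- A's loop state: (spans, active_quote, start, escape); one step of the for-body, branches in A's order.
def pvStepA (st : List (Int × Int) × Option Char × Int × Bool) (i : Int) (ch : Char) :
    List (Int × Int) × Option Char × Int × Bool :=
  match st with
  | (spans, none, start, escape) =>
    if ch == '`' || ch == '\'' || ch == '"' then (spans, some ch, i, escape)
    else (spans, none, start, escape)
  | (spans, some q, start, escape) =>
    if q != '`' && ch == '\\' && !escape then (spans, some q, start, true)
    else if ch == q && !escape then (spans ++ [(start, i + 1)], none, -1, false)
    else (spans, some q, start, false)

-- the for-loop over enumerate(text): structural recursion carrying the running index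
def pvLoopA (l : List Char) (i : Int) (st : List (Int × Int) × Option Char × Int × Bool) :
    List (Int × Int) × Option Char × Int × Bool :=
  match l with
  | [] => st
  | c :: rest => pvLoopA rest (i + 1) (pvStepA st i c)

def protected_spans_py (text : String) : List (Int × Int) :=
  match pvLoopA text.toList 0 ([], none, -1, false) with
  | (spans, active, start, _) =>
    if active.isSome && decide (0 ≤ start) then spans ++ [(start, (text.toList.length : Int))]
    else spans

-- ===== PORT B =====
-- inner closer scan for a backtick span: next backtick closes, backslash is ordinary
def pvScanBT (l : List Char) (j : Int) : Option (Int × List Char) :=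
  match l with
  | [] => none
  | c :: rest => if c == '`' then some (j, rest) else pvScanBT rest (j + 1)

-- inner closer scan for a quote span: backslash escapes exactly one character
def pvScanQ (q : Char) (escape : Bool) (l : List Char) (j : Int) : Option (Int × List Char) :=
  match l with
  | [] => none
  | c :: rest =>
    if escape then pvScanQ q false rest (j + 1)
    else if c == '\\' then pvScanQ q true rest (j + 1)
    else if c == q then some (j, rest)
    else pvScanQ q false rest (j + 1)

theorem pvScanBT_len {l : List Char} {j j' : Int} {r : List Char}
    (h : pvScanBT l j = some (j', r)) : r.length < l.length := by
  induction l generalizing j with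
  | nil => simp [pvScanBT] at h
  | cons c rest ih =>
    simp only [pvScanBT] at h
    split at h
    · cases h; simp
    · exact Nat.lt_trans (ih h) (Nat.lt_succ_self _)

theorem pvScanQ_len {q : Char} {e : Bool} {l : List Char} {j j' : Int} {r : List Char}
    (h : pvScanQ q e l j = some (j', r)) : r.length < l.length := by
  induction l generalizing j e with
  | nil => simp [pvScanQ] at h
  | cons c rest ih =>
    simp only [pvScanQ] at h
    split at h
    · exact Nat.lt_trans (ih h) (Nat.lt_succ_self _)
    · split at h
      · exact Nat.lt_trans (ih h) (Nat.lt_succ_self _)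
      · split at h
        · cases h; simp
        · exact Nat.lt_trans (ih h) (Nat.lt_succ_self _)

-- outer scan: advance to the next opener, dispatch to the matching closer scan
def pvOuterB (l : List Char) (i : Int) (n : Int) : List (Int × Int) :=
  match l with
  | [] => []
  | c :: rest =>
    if c == '`' then
      match h : pvScanBT rest (i + 1) with
      | some (j, rest') => (i, j + 1) :: pvOuterB rest' (j + 1) n
      | none => [(i, n)]
    else if c == '\'' || c == '"' then
      match h : pvScanQ c false rest (i + 1) with
      | some (j, rest') => (i, j + 1) :: pvOuterB rest' (j + 1) n
      | none => [(i, n)]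
    else pvOuterB rest (i + 1) n
termination_by l.length
decreasing_by
  · exact Nat.lt_trans (pvScanBT_len h) (Nat.lt_succ_self _)
  · exact Nat.lt_trans (pvScanQ_len h) (Nat.lt_succ_self _)
  · simp

def protected_spans_py_alt (text : String) : List (Int × Int) :=
  pvOuterB text.toList 0 (text.toList.length : Int)

-- ===== PRECONDITION & SPEC =====
def Spec_protected_spans_py (text : String) (out : List (Int × Int)) : Prop := out = protected_spans_py_alt text
instance (text : String) (out : List (Int × Int)) : Decidable (Spec_protected_spans_py text out) := by unfold Spec_protected_spans_py; infer_instance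

-- ===== CLAIM (what is proved, stated in full; the proofs are below) =====
def Claim_equal_protected_spans_py : Prop := ∀ (text : String), Dom_protected_spans_py text → Spec_protected_spans_py text (protected_spans_py text)

-- ===== LEMMAS AND PROOFS =====

-- finalization of A's state at total length n
def pvFin (n : Int) (st : List (Int × Int) × Option Char × Int × Bool) : List (Int × Int) :=
  match st with
  | (spans, active, start, _) =>
    if active.isSome && decide (0 ≤ start) then spans ++ [(start, n)] else spans

-- equation lemmas for pvOuterB (its dependent match is not defeq to the plain one)
theorem pvOuterB_bt (c : Char) (rest : List Char) (i n : Int) (hc : (c == '`') = true) :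
    pvOuterB (c :: rest) i n =
      (match pvScanBT rest (i + 1) with
        | some (j, rest') => (i, j + 1) :: pvOuterB rest' (j + 1) n
        | none => [(i, n)]) := by
  rw [pvOuterB, if_pos hc]
  rcases hsc : pvScanBT rest (i + 1) with _ | ⟨j, r⟩ <;> simp

theorem pvOuterB_q (c : Char) (rest : List Char) (i n : Int)
    (hbt : (c == '`') = false) (hq : (c == '\'' || c == '"') = true) :
    pvOuterB (c :: rest) i n =
      (match pvScanQ c false rest (i + 1) with
        | some (j, rest') => (i, j + 1) :: pvOuterB rest' (j + 1) n
        | none => [(i, n)]) := by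
  rw [pvOuterB, if_neg (by simp [hbt]), if_pos hq]
  rcases hsc : pvScanQ c false rest (i + 1) with _ | ⟨j, r⟩ <;> simp

theorem pvOuterB_other (c : Char) (rest : List Char) (i n : Int)
    (hbt : (c == '`') = false) (hq : (c == '\'' || c == '"') = false) :
    pvOuterB (c :: rest) i n = pvOuterB rest (i + 1) n := by
  rw [pvOuterB, if_neg (by simp [hbt]), if_neg (by simp [hq])]

-- Main simulation, by strong induction on the remaining suffix length:
--   P  (no active quote)   : A's loop matches B's outer scan;
--   QB (inside a backtick) : A's loop matches pvScanBT then the outer scan;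
--   QQ (inside a quote)    : A's loop matches pvScanQ then the outer scan.
theorem pvMain (N : Nat) :
    ∀ l : List Char, l.length ≤ N →
      (∀ (i start n : Int) (spans : List (Int × Int)), 0 ≤ i → n = i + l.length →
        pvFin n (pvLoopA l i (spans, none, start, false)) =
          spans ++ pvOuterB l i n) ∧
      (∀ (j start n : Int) (spans : List (Int × Int)), 0 ≤ j → 0 ≤ start → n = j + l.length →
        pvFin n (pvLoopA l j (spans, some '`', start, false)) =
          spans ++ (match pvScanBT l j with
            | some (j', r) => (start, j' + 1) :: pvOuterB r (j' + 1) n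
            | none => [(start, n)])) ∧
      (∀ (q : Char) (e : Bool) (j start n : Int) (spans : List (Int × Int)),
        q ≠ '`' → 0 ≤ j → 0 ≤ start → n = j + l.length →
        pvFin n (pvLoopA l j (spans, some q, start, e)) =
          spans ++ (match pvScanQ q e l j with
            | some (j', r) => (start, j' + 1) :: pvOuterB r (j' + 1) n
            | none => [(start, n)])) := by
  induction N with
  | zero =>
    intro l hl
    have h0 : l = [] := List.length_eq_zero_iff.mp (Nat.le_zero.mp hl)
    subst h0
    refine ⟨?_, ?_, ?_⟩
    · intro i start n spans hi hn; simp [pvLoopA, pvOuterB, pvFin]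
    · intro j start n spans hj hs hn; simp [pvLoopA, pvScanBT, pvFin, hs]
    · intro q e j start n spans hq hj hs hn; simp [pvLoopA, pvScanQ, pvFin, hs]
  | succ N ih =>
    intro l hl
    match l with
    | [] =>
      refine ⟨?_, ?_, ?_⟩
      · intro i start n spans hi hn; simp [pvLoopA, pvOuterB, pvFin]
      · intro j start n spans hj hs hn; simp [pvLoopA, pvScanBT, pvFin, hs]
      · intro q e j start n spans hq hj hs hn; simp [pvLoopA, pvScanQ, pvFin, hs]
    | c :: rest =>
      have hr : rest.length ≤ N := by
        simp only [List.length_cons] at hl; omega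
      obtain ⟨ihP, ihQB, ihQQ⟩ := ih rest hr
      refine ⟨?_, ?_, ?_⟩
      · -- P: no active quote
        intro i start n spans hi hn
        have hn1 : n = (i + 1) + rest.length := by
          simp only [List.length_cons] at hn; push_cast at hn ⊢; omega
        simp only [pvLoopA]
        by_cases hbt : c = '`'
        · subst hbt
          have hstep : pvStepA (spans, none, start, false) i '`' = (spans, some '`', i, false) := by
            simp [pvStepA]
          rw [hstep, pvOuterB_bt '`' rest i n (by decide),
            ihQB (i + 1) i n spans (by omega) hi hn1]
        · by_cases hqt : c = '\'' ∨ c = '"'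
          · have hq1 : (c == '\'' || c == '"') = true := by
              rcases hqt with h | h <;> subst h <;> decide
            have hb0 : (c == '`') = false := by simp [hbt]
            have hstep : pvStepA (spans, none, start, false) i c = (spans, some c, i, false) := by
              simp [pvStepA, hb0, hq1]
            rw [hstep, pvOuterB_q c rest i n hb0 hq1,
              ihQQ c false (i + 1) i n spans hbt (by omega) hi hn1]
          · rw [not_or] at hqt
            have hb0 : (c == '`') = false := by simp [hbt]
            have hq0 : (c == '\'' || c == '"') = false := by simp [hqt.1, hqt.2]
            have hstep : pvStepA (spans, none, start, false) i c = (spans, none, start, false) := by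
              simp [pvStepA, hb0, hq0]
            rw [hstep, pvOuterB_other c rest i n hb0 hq0,
              ihP (i + 1) start n spans (by omega) hn1]
      · -- QB: inside a backtick span
        intro j start n spans hj hs hn
        have hn1 : n = (j + 1) + rest.length := by
          simp only [List.length_cons] at hn; push_cast at hn ⊢; omega
        simp only [pvLoopA]
        by_cases hc : c = '`'
        · subst hc
          have hstep : pvStepA (spans, some '`', start, false) j '`' =
              (spans ++ [(start, j + 1)], none, -1, false) := by
            simp [pvStepA]
          have hsc : pvScanBT ('`' :: rest) j = some (j, rest) := by
            simp [pvScanBT]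
          rw [hstep, ihP (j + 1) (-1 : Int) n (spans ++ [(start, j + 1)]) (by omega) hn1, hsc]
          simp
        · have hc0 : (c == '`') = false := by simp [hc]
          have hstep : pvStepA (spans, some '`', start, false) j c =
              (spans, some '`', start, false) := by
            simp [pvStepA, hc0]
          have hsc : pvScanBT (c :: rest) j = pvScanBT rest (j + 1) := by
            simp [pvScanBT, hc0]
          rw [hstep, ihQB (j + 1) start n spans (by omega) hs hn1, hsc]
      · -- QQ: inside a quote span
        intro q e j start n spans hq hj hs hn
        have hn1 : n = (j + 1) + rest.length := by
          simp only [List.length_cons] at hn; push_cast at hn ⊢; omega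
        have hqb : (q != '`') = true := by simp [hq]
        simp only [pvLoopA]
        by_cases he : e = true
        · subst he
          have hstep : pvStepA (spans, some q, start, true) j c =
              (spans, some q, start, false) := by
            simp [pvStepA]
          have hsc : pvScanQ q true (c :: rest) j = pvScanQ q false rest (j + 1) := by
            simp [pvScanQ]
          rw [hstep, ihQQ q false (j + 1) start n spans hq (by omega) hs hn1, hsc]
        · have he0 : e = false := by cases e <;> simp_all
          subst he0
          by_cases hbs : c = '\\'
          · subst hbs
            have hstep : pvStepA (spans, some q, start, false) j '\\' =
                (spans, some q, start, true) := by
              simp [pvStepA, hqb]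
            have hsc : pvScanQ q false ('\\' :: rest) j = pvScanQ q true rest (j + 1) := by
              simp [pvScanQ]
            rw [hstep, ihQQ q true (j + 1) start n spans hq (by omega) hs hn1, hsc]
          · have hbs0 : (c == '\\') = false := by simp [hbs]
            by_cases hcq : c = q
            · subst hcq
              have hstep : pvStepA (spans, some c, start, false) j c =
                  (spans ++ [(start, j + 1)], none, -1, false) := by
                simp [pvStepA, hbs0]
              have hsc : pvScanQ c false (c :: rest) j = some (j, rest) := by
                simp [pvScanQ, hbs0]
              rw [hstep, ihP (j + 1) (-1 : Int) n (spans ++ [(start, j + 1)]) (by omega) hn1, hsc]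
              simp
            · have hcq0 : (c == q) = false := by simp [hcq]
              have hstep : pvStepA (spans, some q, start, false) j c =
                  (spans, some q, start, false) := by
                simp [pvStepA, hbs0, hcq0]
              have hsc : pvScanQ q false (c :: rest) j = pvScanQ q false rest (j + 1) := by
                simp [pvScanQ, hbs0, hcq0]
              rw [hstep, ihQQ q false (j + 1) start n spans hq (by omega) hs hn1, hsc]

-- ===== VERDICT (by name: the statement is the Claim_ definition above) =====
theorem protected_spans_py_spec : Claim_equal_protected_spans_py := by
  intro text _
  unfold Spec_protected_spans_py protected_spans_py protected_spans_py_alt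
  have h := (pvMain text.toList.length text.toList le_rfl).1
    0 (-1) (text.toList.length : Int) [] le_rfl (by ring)
  have hfin : pvFin (text.toList.length : Int) (pvLoopA text.toList 0 ([], none, -1, false)) =
      (match pvLoopA text.toList 0 ([], none, -1, false) with
        | (spans, active, start, _) =>
          if active.isSome && decide (0 ≤ start) then spans ++ [(start, (text.toList.length : Int))]
          else spans) := rfl
  rw [← hfin, h]
  simp
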